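-- pv_equiv track=rewrite | github.com/t-tsekov/codefights-solutions | arcade/the-core/mirror-lake/constructSquare.py | constructSquare
-- ===== SOURCE A (Python) =====
-- def constructSquare(s):
--     length = len(s)
--     distinct = len(set(list(s)))
--
--     counts = sorted([s.count(char) for char in set(list(s))])
--
--     i = 1
--
--     while len(str(i * i)) < length:
--         i += 1
--
--     vals = []
--     while (len(str(i * i)) == length):
--         if len(set(list(str(i * i)))) == distinct:
--             number = str(i * i)
--             counts2 = sorted([number.count(char) for char in set(list(number))])
--             if counts == counts2:
--                 vals.append(i * i)
--         i += 1
--     return -1 if vals == [] else max(vals)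
-- ===== SOURCE B (Python) =====
-- def _isqrt(m):
--     # floor integer square root (Newton), m is a non-negative int
--     if m <= 1:
--         return m
--     x = m // 2
--     while (x + m // x) // 2 < x:
--         x = (x + m // x) // 2
--     return x
--
--
-- def _signature(t):
--     # sorted list of character frequencies of the string t
--     d = {}
--     for ch in t:
--         d[ch] = d.get(ch, 0) + 1
--     return sorted(d.values())
--
--
-- def constructSquare(s):
--     length = len(s)
--     if length == 0:
--         return -1
--     sig = _signature(s)
--     n = _isqrt(10 ** length - 1)
--     while n >= 0 and len(str(n * n)) == length:
--         if _signature(str(n * n)) == sig: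
--             return n * n
--         n -= 1
--     return -1
-- ===== Notes on version B (the rewrite author's own statement) =====
-- stated objective: alternative
-- what changed: B replaces A's count-up-from-1 warm-up loop and ascending collect-all-matches-then-max scan by computing the top candidate directly with a hand-rolled integer square root of 10**len(s)-1 and scanning DOWNWARD with early exit at the first match, comparing signatures built by a single dict counting pass instead of A's per-character set+count scans.
import Mathlib
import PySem

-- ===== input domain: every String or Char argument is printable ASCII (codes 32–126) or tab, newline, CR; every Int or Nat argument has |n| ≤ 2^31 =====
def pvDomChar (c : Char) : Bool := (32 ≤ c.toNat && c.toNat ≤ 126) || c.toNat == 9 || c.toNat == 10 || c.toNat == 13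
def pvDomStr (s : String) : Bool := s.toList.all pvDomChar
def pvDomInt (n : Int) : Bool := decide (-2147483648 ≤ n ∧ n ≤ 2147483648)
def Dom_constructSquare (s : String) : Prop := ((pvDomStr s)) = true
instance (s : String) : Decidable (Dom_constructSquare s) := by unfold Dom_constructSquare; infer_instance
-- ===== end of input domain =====

-- B replaces A's ascending collect-all-matches-then-max scan (with its count-up-from-1
-- warm-up loop) by a single descending first-match scan from the integer square root of
-- 10^len(s)-1, comparing digit-frequency signatures built by one counting pass (alternative decomposition).

-- ===== PORT A =====
-- while len(str(i*i)) < length: i += 1   (fuel only makes the loop total; proven sufficient)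
def csqLoop1 (length : Int) : Nat → Int → Int
  | 0, i => i
  | fuel + 1, i =>
    if PySem.Str.len (PySem.Int.toStr (i * i)) < length then csqLoop1 length fuel (i + 1)
    else i

-- while len(str(i*i)) == length: …collect… ; i += 1   (fuel only makes the loop total)
def csqLoop2 (length distinct : Int) (counts : List Int) : Nat → Int → List Int → List Int
  | 0, _, vals => vals
  | fuel + 1, i, vals =>
    if PySem.Str.len (PySem.Int.toStr (i * i)) = length then
      csqLoop2 length distinct counts fuel (i + 1)
        (if PySem.Set.len (PySem.Set.ofList (PySem.Int.toChars (i * i))) = distinct then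
          (if counts = PySem.List.sorted ((PySem.Set.ofList (PySem.Int.toChars (i * i))).map
                (fun c => (PySem.List.count (PySem.Int.toChars (i * i)) c : Int)))
                (fun x => x) false
           then vals ++ [i * i] else vals)
         else vals)
    else vals

def constructSquare (s : String) : Int :=
  let length := PySem.Str.len s
  let distinct := PySem.Set.len (PySem.Set.ofList s.toList)
  -- s.count(char) for a 1-character char is ported as the code-point count (exact)
  let counts := PySem.List.sorted ((PySem.Set.ofList s.toList).map
      (fun c => (PySem.List.count s.toList c : Int))) (fun x => x) false
  -- fuel 10^len(s)+2 bounds both loops (i stays ≤ 10^len(s); proven sufficient below)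
  let fuel := 10 ^ length.toNat + 2
  let vals := csqLoop2 length distinct counts fuel (csqLoop1 length fuel 1) []
  if vals = [] then -1 else (PySem.List.max? vals (fun x => x)).getD 0

-- ===== PORT B =====
-- _isqrt's argument 10**len(s)-1 is a non-negative int, so it is ported on Nat
-- (Python's // on non-negative ints is Nat division; exact)
def pyIsqrtIter (m x : Nat) : Nat :=
  if h : (x + m / x) / 2 < x then pyIsqrtIter m ((x + m / x) / 2)
  else x
  termination_by x

def pyIsqrt (m : Nat) : Nat :=
  if m ≤ 1 then m
  else pyIsqrtIter m (m / 2)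

-- _signature: d[ch] = d.get(ch, 0) + 1 over t, then sorted(d.values())
def pySignature (t : List Char) : List Int :=
  let d := t.foldl (fun d ch => d.insert ch (d.getD ch 0 + 1)) PySem.Dict.empty
  PySem.List.sorted d.values (fun x => x) false

-- while n >= 0 and len(str(n*n)) == length: … ; n -= 1   (fuel only makes the loop total)
def bLoop (length : Nat) (sig : List Int) : Nat → Int → Int
  | 0, _ => -1
  | fuel + 1, n =>
    if 0 ≤ n ∧ PySem.Str.len (PySem.Int.toStr (n * n)) = (length : Int) then
      if pySignature (PySem.Int.toChars (n * n)) = sig then n * n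
      else bLoop length sig fuel (n - 1)
    else -1

def constructSquare_alt (s : String) : Int :=
  let length := s.toList.length        -- len(s), kept as a Nat (len(s) ≥ 0; exact)
  if length = 0 then -1
  else bLoop length (pySignature s.toList) (pyIsqrt (10 ^ length - 1) + 2)
    ((pyIsqrt (10 ^ length - 1) : Nat) : Int)

-- ===== PRECONDITION & SPEC =====
def Spec_constructSquare (s : String) (out : Int) : Prop := out = constructSquare_alt s
instance (s : String) (out : Int) : Decidable (Spec_constructSquare s out) := by unfold Spec_constructSquare; infer_instance

-- ===== CLAIM (what is proved, stated in full; the proofs are below) =====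
def Claim_equal_constructSquare : Prop := ∀ (s : String), Dom_constructSquare s → Spec_constructSquare s (constructSquare s)

-- ===== LEMMAS AND PROOFS =====

-- length of str(n) is one more than log10 n
theorem tdcLen : ∀ (f n : Nat), n < f → (Nat.toDigitsCore 10 f n []).length = Nat.log 10 n + 1 := by
  intro f
  induction f with
  | zero => omega
  | succ f ih =>
    intro n hn
    simp only [Nat.toDigitsCore]
    by_cases h : n / 10 = 0
    · simp [h, Nat.log_eq_zero_iff, Nat.lt_of_div_eq_zero (by norm_num) h]
    · rw [if_neg h, Nat.toDigitsCore_lens_eq, ih (n / 10) (by omega)]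
      have h10 : 10 ≤ n := by
        by_contra hc
        exact h (Nat.div_eq_of_lt (by omega))
      have := Nat.log_div_base 10 n
      have := Nat.log_pos (by norm_num : 1 < 10) h10
      omega

theorem toCharsLen (n : Nat) : (PySem.Int.toChars (n : Int)).length = Nat.log 10 n + 1 := by
  simp [PySem.Int.toChars, Nat.toDigits]
  exact tdcLen _ _ (Nat.lt_succ_self n)

theorem strLenToStr (n : Nat) :
    PySem.Str.len (PySem.Int.toStr (n : Int)) = ((Nat.log 10 n + 1 : Nat) : Int) := by
  rw [PySem.Str.len_eq, PySem.Int.toList_toStr, toCharsLen]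


-- the sorted digit/character-frequency signature both programs compare
def csOf (t : List Char) : List Int :=
  PySem.List.sorted ((PySem.Set.ofList t).map
    (fun c => (PySem.List.count t c : Int))) (fun x => x) false

-- the candidate interval: n with len(str(n*n)) == L is exactly loA L ≤ n ≤ hiA L (n ≥ 1)
def loA (L : Nat) : Nat := Nat.sqrt (10 ^ (L - 1) - 1) + 1
def hiA (L : Nat) : Nat := Nat.sqrt (10 ^ L - 1)

def pB (counts : List Int) (j : Nat) : Bool :=
  decide (csOf (PySem.Int.toChars ((j * j : Nat) : Int)) = counts)

theorem digEq_iff (L n : Nat) (hL : 1 ≤ L) (hn : 1 ≤ n) :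
    PySem.Str.len (PySem.Int.toStr ((n : Int) * n)) = (L : Int) ↔ loA L ≤ n ∧ n ≤ hiA L := by
  have hcast : (n : Int) * n = ((n * n : Nat) : Int) := by push_cast; ring
  rw [hcast, strLenToStr]
  have hnn : 1 ≤ n * n := Nat.one_le_iff_ne_zero.mpr (by positivity)
  have hp1 : 1 ≤ 10 ^ (L - 1) := Nat.one_le_pow _ _ (by norm_num)
  have hp2 : 1 ≤ 10 ^ L := Nat.one_le_pow _ _ (by norm_num)
  unfold loA hiA
  constructor
  · intro h
    have hlog : Nat.log 10 (n * n) + 1 = L := by exact_mod_cast h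
    have h1 : 10 ^ (L - 1) ≤ n * n := by
      rw [show L - 1 = Nat.log 10 (n * n) from by omega]
      exact Nat.pow_log_le_self 10 (by omega)
    have h2 : n * n < 10 ^ L := by
      rw [show L = (Nat.log 10 (n * n)).succ from by omega]
      exact Nat.lt_pow_succ_log_self (by norm_num) _
    refine ⟨?_, ?_⟩
    · have := Nat.sqrt_lt.mpr (show 10 ^ (L - 1) - 1 < n * n by omega)
      omega
    · exact Nat.le_sqrt.mpr (by omega)
  · rintro ⟨ha, hb⟩
    have h1 : 10 ^ (L - 1) ≤ n * n := by
      have := Nat.sqrt_lt.mp (show Nat.sqrt (10 ^ (L - 1) - 1) < n by omega)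
      omega
    have h2 : n * n < 10 ^ L := by
      have := Nat.le_sqrt.mp hb
      omega
    have : Nat.log 10 (n * n) = L - 1 := by
      refine Nat.log_eq_of_pow_le_of_lt_pow h1 ?_
      rw [show L - 1 + 1 = L from by omega]
      exact h2
    have : Nat.log 10 (n * n) + 1 = L := by omega
    exact_mod_cast this

theorem digLt_iff (L n : Nat) (hn : 1 ≤ n) :
    PySem.Str.len (PySem.Int.toStr ((n : Int) * n)) < (L : Int) ↔ n < loA L := by
  have hcast : (n : Int) * n = ((n * n : Nat) : Int) := by push_cast; ring
  rw [hcast, strLenToStr]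
  have hnn : 1 ≤ n * n := Nat.one_le_iff_ne_zero.mpr (by positivity)
  have hp1 : 1 ≤ 10 ^ (L - 1) := Nat.one_le_pow _ _ (by norm_num)
  unfold loA
  rcases Nat.eq_zero_or_pos L with hL | hL
  · subst hL
    constructor
    · intro h
      have : (1 : Int) ≤ ((Nat.log 10 (n * n) + 1 : Nat) : Int) := by exact_mod_cast Nat.le_add_left 1 _
      omega
    · intro h
      simp at h
      omega
  · have chain : Nat.log 10 (n * n) + 1 < L ↔ n * n < 10 ^ (L - 1) := by
      rw [show (Nat.log 10 (n * n) + 1 < L) = (Nat.log 10 (n * n) < L - 1) from by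
        apply propext; omega]
      exact Nat.log_lt_iff_lt_pow (by norm_num) (by omega)
    constructor
    · intro h
      have h' : Nat.log 10 (n * n) + 1 < L := by exact_mod_cast h
      have := chain.mp h'
      have := Nat.le_sqrt.mpr (show n * n ≤ 10 ^ (L - 1) - 1 by omega)
      omega
    · intro h
      have hsq : n ≤ Nat.sqrt (10 ^ (L - 1) - 1) := by omega
      have := Nat.le_sqrt.mp hsq
      have h' : Nat.log 10 (n * n) + 1 < L := chain.mpr (by omega)
      exact_mod_cast h'

theorem loA_le_hiA_succ (L : Nat) : loA L ≤ hiA L + 1 := by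
  unfold loA hiA
  have : 10 ^ (L - 1) - 1 ≤ 10 ^ L - 1 :=
    Nat.sub_le_sub_right (Nat.pow_le_pow_right (by norm_num) (by omega)) 1
  have := Nat.sqrt_le_sqrt this
  omega

theorem pySignature_eq_csOf (t : List Char) : pySignature t = csOf t := by
  unfold pySignature csOf
  rw [PySem.Dict.foldl_insert_getD_add_one_eq_counter]
  show PySem.List.sorted (PySem.Dict.counter t).values (fun x => x) false
      = PySem.List.sorted _ (fun x => x) false
  congr 1
  rw [PySem.Dict.values_eq_map_keys _ (PySem.Dict.nodup_keys_counter t) 0,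
    PySem.Dict.keys_counter]
  refine List.map_congr_left ?_
  intro c _
  rw [PySem.Dict.getD_counter, PySem.List.count_eq]

theorem csOf_len_eq {t u : List Char} (h : csOf t = csOf u) :
    PySem.Set.len (PySem.Set.ofList t) = PySem.Set.len (PySem.Set.ofList u) := by
  have := congrArg List.length h
  unfold csOf at this
  simp only [PySem.List.length_sorted, List.length_map] at this
  unfold PySem.Set.len
  omega

theorem sqrt_mul_self_le (m : Nat) : Nat.sqrt m * Nat.sqrt m ≤ m := by
  have := Nat.sqrt_le' m
  rwa [pow_two] at this

theorem newton_ge (m g : Nat) (hg : 1 ≤ g) : Nat.sqrt m ≤ (g + m / g) / 2 := by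
  set s := Nat.sqrt m with hs
  have hsm : s * s ≤ m := sqrt_mul_self_le m
  have hdiv : s * s / g ≤ m / g := Nat.div_le_div_right hsm
  have key : 2 * s ≤ g + s * s / g := by
    by_contra hcon
    have hq := Nat.div_add_mod (s * s) g
    have hr : s * s % g < g := Nat.mod_lt _ (by omega)
    have hcon' : g + s * s / g + 1 ≤ 2 * s := by omega
    nlinarith [sq_nonneg ((g : Int) - (s : Int)), hq, hr, hcon']
  refine (Nat.le_div_iff_mul_le (by norm_num)).mpr ?_
  omega

theorem pyIsqrtIter_eq (m : Nat) : ∀ g, 1 ≤ Nat.sqrt m → Nat.sqrt m ≤ g →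
    pyIsqrtIter m g = Nat.sqrt m := by
  intro g
  induction g using Nat.strong_induction_on with
  | _ g IH =>
    intro hs hg
    rw [pyIsqrtIter]
    by_cases h : (g + m / g) / 2 < g
    · rw [dif_pos h]
      exact IH _ h hs (newton_ge m g (by omega))
    · rw [dif_neg h]
      have h2 : g * 2 ≤ g + m / g := (Nat.le_div_iff_mul_le (by norm_num)).mp (le_of_not_gt h)
      have h3 : g ≤ m / g := by omega
      have h4 : g * g ≤ m := (Nat.le_div_iff_mul_le (by omega)).mp h3
      have := Nat.le_sqrt.mpr h4
      omega

theorem pyIsqrt_eq_sqrt (m : Nat) : pyIsqrt m = Nat.sqrt m := by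
  unfold pyIsqrt
  by_cases hm : m ≤ 1
  · rw [if_pos hm]
    interval_cases m <;> simp
  · rw [if_neg hm]
    have hs1 : 1 ≤ Nat.sqrt m := Nat.le_sqrt.mpr (by omega)
    refine pyIsqrtIter_eq m _ hs1 ?_
    have hsm : Nat.sqrt m * Nat.sqrt m ≤ m := sqrt_mul_self_le m
    rcases Nat.lt_or_ge 1 (Nat.sqrt m) with h1 | h1
    · refine (Nat.le_div_iff_mul_le (by norm_num)).mpr ?_
      nlinarith
    · have : 1 ≤ m / 2 := (Nat.le_div_iff_mul_le (by norm_num)).mpr (by omega)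
      omega

theorem csqLoop1_stop (length : Int) (fuel : Nat) (i : Int)
    (h : ¬ PySem.Str.len (PySem.Int.toStr (i * i)) < length) :
    csqLoop1 length fuel i = i := by
  cases fuel with
  | zero => rfl
  | succ f => simp only [csqLoop1, if_neg h]

theorem csqLoop2_stop (length distinct : Int) (counts : List Int) (fuel : Nat) (i : Int)
    (vals : List Int) (h : ¬ PySem.Str.len (PySem.Int.toStr (i * i)) = length) :
    csqLoop2 length distinct counts fuel i vals = vals := by
  cases fuel with
  | zero => rfl
  | succ f => simp only [csqLoop2, if_neg h]

theorem loop1_eq (L : Nat) : ∀ (fuel i : Nat), 1 ≤ i → i ≤ loA L → loA L - i < fuel →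
    csqLoop1 (L : Int) fuel (i : Int) = (loA L : Int) := by
  intro fuel
  induction fuel with
  | zero => omega
  | succ f ih =>
    intro i h1 h2 hf
    by_cases hi : i = loA L
    · rw [csqLoop1_stop _ _ _ (by rw [digLt_iff L i h1]; omega)]
      exact_mod_cast congrArg (Nat.cast : Nat → Int) hi
    · simp only [csqLoop1, if_pos (show PySem.Str.len (PySem.Int.toStr ((i : Int) * i)) < (L : Int)
        from by rw [digLt_iff L i h1]; omega)]
      rw [show ((i : Int) + 1) = ((i + 1 : Nat) : Int) from by push_cast; ring]
      exact ih (i + 1) (by omega) (by omega) (by omega)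

theorem loop2_eq (L : Nat) (hL : 1 ≤ L) (distinct : Int) (counts : List Int)
    (hdc : ∀ t : List Char, csOf t = counts → PySem.Set.len (PySem.Set.ofList t) = distinct) :
    ∀ (fuel n : Nat), loA L ≤ n → n ≤ hiA L + 1 → hiA L + 1 - n < fuel → ∀ vals : List Int,
      csqLoop2 (L : Int) distinct counts fuel (n : Int) vals
        = vals ++ ((List.range' n (hiA L + 1 - n)).filter (pB counts)).map
            (fun j : Nat => ((j : Int) * (j : Int))) := by
  intro fuel
  induction fuel with
  | zero => omega
  | succ f ih =>
    intro n hlo hhi hf vals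
    have hn1 : 1 ≤ n := by
      have : 1 ≤ loA L := by unfold loA; omega
      omega
    by_cases hn : n = hiA L + 1
    · rw [csqLoop2_stop _ _ _ _ _ _ (by rw [digEq_iff L n hL hn1]; omega)]
      rw [hn]
      simp
    · have hnhi : n ≤ hiA L := by omega
      simp only [csqLoop2, if_pos ((digEq_iff L n hL hn1).mpr ⟨hlo, hnhi⟩)]
      have hcast : (n : Int) * n = ((n * n : Nat) : Int) := by push_cast; ring
      have hbody : (if PySem.Set.len (PySem.Set.ofList (PySem.Int.toChars ((n : Int) * n)))
              = distinct then
            (if counts = PySem.List.sorted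
                ((PySem.Set.ofList (PySem.Int.toChars ((n : Int) * n))).map
                  (fun c => (PySem.List.count (PySem.Int.toChars ((n : Int) * n)) c : Int)))
                (fun x => x) false
             then vals ++ [(n : Int) * n] else vals)
          else vals)
          = (if pB counts n then vals ++ [(n : Int) * n] else vals) := by
        by_cases hp : csOf (PySem.Int.toChars ((n : Int) * n)) = counts
        · have hpB : pB counts n = true := by
            unfold pB
            rw [← hcast]
            exact decide_eq_true hp
          have hc : counts = PySem.List.sorted
              ((PySem.Set.ofList (PySem.Int.toChars ((n : Int) * n))).map
                (fun c => (PySem.List.count (PySem.Int.toChars ((n : Int) * n)) c : Int)))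
              (fun x => x) false := hp.symm
          rw [if_pos (hdc _ hp), if_pos hc, if_pos hpB]
        · have hpB : pB counts n = false := by
            unfold pB
            rw [← hcast]
            exact decide_eq_false hp
          rw [hpB]
          simp only [Bool.false_eq_true, if_false]
          split_ifs with hd hc
          · exact absurd (show csOf (PySem.Int.toChars ((n : Int) * n)) = counts
              from hc.symm) hp
          · rfl
          · rfl
      rw [hbody]
      rw [show ((n : Int) + 1) = ((n + 1 : Nat) : Int) from by push_cast; ring]
      rw [ih (n + 1) (by omega) (by omega) (by omega)]
      rw [show hiA L + 1 - n = (hiA L - n) + 1 from by omega,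
        List.range'_succ, show hiA L + 1 - (n + 1) = hiA L - n from by omega]
      rw [List.filter_cons]
      by_cases hp : pB counts n
      · rw [if_pos hp, if_pos hp]
        simp
      · rw [if_neg (by simp [hp]), if_neg (by simp [hp])]

theorem loA_ge4 (L : Nat) (hL : 2 ≤ L) : 4 ≤ loA L := by
  unfold loA
  have h10 : 10 ≤ 10 ^ (L - 1) := by
    calc (10 : Nat) = 10 ^ 1 := (pow_one 10).symm
    _ ≤ 10 ^ (L - 1) := Nat.pow_le_pow_right (by norm_num) (by omega)
  have := Nat.le_sqrt.mpr (show 3 * 3 ≤ 10 ^ (L - 1) - 1 by omega)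
  omega

theorem bLoop_none (L : Nat) (hL : 2 ≤ L) (counts : List Int) :
    ∀ (fuel n : Nat), loA L ≤ n + 1 → n ≤ hiA L →
      (List.range' (loA L) (n + 1 - loA L)).filter (pB counts) = [] →
      n + 2 - loA L ≤ fuel →
      bLoop L counts fuel (n : Int) = -1 := by
  have hL1 : 1 ≤ L := by omega
  have hlo4 := loA_ge4 L hL
  intro fuel
  induction fuel with
  | zero => omega
  | succ f ih =>
    intro n hlo hhi hfil hf
    have hn1 : 1 ≤ n := by omega
    by_cases hcase : n + 1 = loA L
    · simp only [bLoop]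
      rw [if_neg]
      intro hcon
      have := (digEq_iff L n hL1 hn1).mp hcon.2
      omega
    · have hlon : loA L ≤ n := by omega
      simp only [bLoop, if_pos (⟨by positivity, (digEq_iff L n hL1 hn1).mpr ⟨hlon, hhi⟩⟩ :
        (0 : Int) ≤ (n : Int) ∧ PySem.Str.len (PySem.Int.toStr ((n : Int) * n)) = (L : Int))]
      have hcast : (n : Int) * n = ((n * n : Nat) : Int) := by push_cast; ring
      have hmem : n ∈ List.range' (loA L) (n + 1 - loA L) := by
        rw [List.mem_range'_1]
        exact ⟨hlon, by omega⟩
      have hnp : ¬ (pB counts n = true) := by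
        intro hp
        have := List.filter_eq_nil_iff.mp hfil n hmem
        simp [hp] at this
      have hsig : ¬ (pySignature (PySem.Int.toChars ((n : Int) * n)) = counts) := by
        intro hs
        apply hnp
        unfold pB
        rw [← hcast]
        exact decide_eq_true (by rw [← pySignature_eq_csOf]; exact hs)
      rw [if_neg hsig]
      rw [show ((n : Int) - 1) = ((n - 1 : Nat) : Int) from by push_cast [hn1]; ring]
      refine ih (n - 1) (by omega) (by omega) ?_ (by omega)
      have hsplit : List.range' (loA L) (n + 1 - loA L)
          = List.range' (loA L) (n - loA L) ++ [n] := by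
        rw [show n + 1 - loA L = (n - loA L) + 1 from by omega, List.range'_concat]
        congr 2
        omega
      rw [hsplit, List.filter_append] at hfil
      rw [show n - 1 + 1 - loA L = n - loA L from by omega]
      exact List.append_eq_nil_iff.mp hfil |>.1

theorem bLoop_some (L : Nat) (hL : 1 ≤ L) (counts : List Int) :
    ∀ (fuel n : Nat), loA L ≤ n → n ≤ hiA L → ∀ j : Nat,
      ((List.range' (loA L) (n + 1 - loA L)).filter (pB counts)).getLast? = some j →
      n + 1 - loA L ≤ fuel →
        bLoop L counts fuel (n : Int) = (j : Int) * (j : Int) := by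
  intro fuel
  induction fuel with
  | zero =>
    intro n hlo hhi j hj hf
    rw [show n + 1 - loA L = 0 from by omega] at hj
    simp at hj
  | succ f ih =>
    intro n hlo hhi j hj hf
    have hn1 : 1 ≤ n := by
      have : 1 ≤ loA L := by unfold loA; omega
      omega
    simp only [bLoop, if_pos (⟨by positivity, (digEq_iff L n hL hn1).mpr ⟨hlo, hhi⟩⟩ :
      (0 : Int) ≤ (n : Int) ∧ PySem.Str.len (PySem.Int.toStr ((n : Int) * n)) = (L : Int))]
    have hcast : (n : Int) * n = ((n * n : Nat) : Int) := by push_cast; ring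
    have hsplit : List.range' (loA L) (n + 1 - loA L)
        = List.range' (loA L) (n - loA L) ++ [n] := by
      rw [show n + 1 - loA L = (n - loA L) + 1 from by omega, List.range'_concat]
      congr 2
      omega
    rw [hsplit, List.filter_append] at hj
    by_cases hp : pB counts n = true
    · have hsig : pySignature (PySem.Int.toChars ((n : Int) * n)) = counts := by
        rw [pySignature_eq_csOf]
        have := of_decide_eq_true (show decide (csOf (PySem.Int.toChars ((n * n : Nat) : Int))
            = counts) = true from hp)
        rwa [← hcast] at this
      rw [if_pos hsig]
      have hfn : List.filter (pB counts) [n] = [n] := by simp [hp]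
      rw [hfn, List.getLast?_concat] at hj
      injection hj with hj
      subst hj
      rfl
    · have hsig : ¬ (pySignature (PySem.Int.toChars ((n : Int) * n)) = counts) := by
        intro hs
        apply hp
        unfold pB
        rw [← hcast]
        exact decide_eq_true (by rw [← pySignature_eq_csOf]; exact hs)
      rw [if_neg hsig]
      have hfn : List.filter (pB counts) [n] = [] := by simp [hp]
      rw [hfn, List.append_nil] at hj
      have hlon : loA L ≤ n - 1 := by
        rcases Nat.lt_or_ge (loA L) n with h | h
        · omega
        · have : n = loA L := by omega
          rw [this] at hj
          simp at hj
      rw [show ((n : Int) - 1) = ((n - 1 : Nat) : Int) from by push_cast [hn1]; ring]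
      refine ih (n - 1) hlon (by omega) j ?_ (by omega)
      rw [show n - 1 + 1 - loA L = n - loA L from by omega]
      exact hj

theorem foldlMax_getLast? : ∀ (t : List Int) (x : Int), (x :: t).Pairwise (· < ·) →
    (x :: t).getLast? = some (t.foldl max x) := by
  intro t
  induction t with
  | nil => intro x _; simp
  | cons y t ih =>
    intro x hp
    have hxy : x < y := (List.pairwise_cons.mp hp).1 y (by simp)
    have hyt : (y :: t).Pairwise (· < ·) := (List.pairwise_cons.mp hp).2
    rw [List.getLast?_cons_cons, ih y hyt]
    simp only [List.foldl_cons]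
    rw [max_eq_right (le_of_lt hxy)]

theorem max_getD_eq_getLast? (xs : List Int) (hp : xs.Pairwise (· < ·)) (x : Int)
    (hx : xs.getLast? = some x) : (PySem.List.max? xs (fun x => x)).getD 0 = x := by
  cases xs with
  | nil => simp at hx
  | cons a t =>
    rw [PySem.List.max?_id_cons, Option.getD_some]
    rw [foldlMax_getLast? t a hp] at hx
    exact Option.some.inj hx

theorem csOf_single (c : Char) : csOf [c] = [1] := by
  unfold csOf
  have h1 : PySem.Set.ofList [c] = [c] := rfl
  rw [h1]
  simp [PySem.List.count_eq]
  exact PySem.List.sorted_eq_self_of_pairwise _ _ (by simp)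

theorem pB_three (counts : List Int) (h : counts = [1]) : pB counts 3 = true := by
  subst h
  decide

theorem sqrt_nine : Nat.sqrt 9 = 3 := by
  have h1 := Nat.le_sqrt.mpr (show 3 * 3 ≤ 9 by norm_num)
  have h2 := Nat.sqrt_lt.mpr (show 9 < 4 * 4 by norm_num)
  omega

-- ===== VERDICT (by name: the statement is the Claim_ definition above) =====
theorem constructSquare_spec : Claim_equal_constructSquare := by
  unfold Claim_equal_constructSquare Spec_constructSquare
  intro s _
  unfold constructSquare constructSquare_alt
  simp only [PySem.Str.len_eq, pyIsqrt_eq_sqrt, pySignature_eq_csOf, Int.toNat_natCast]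
  set L := s.toList.length with hLdef
  have hcs : PySem.List.sorted ((PySem.Set.ofList s.toList).map
      (fun c => (PySem.List.count s.toList c : Int))) (fun x => x) false = csOf s.toList := rfl
  rw [hcs]
  by_cases hL0 : L = 0
  · rw [hL0, if_pos rfl]
    rw [csqLoop1_stop _ _ _ (by decide), csqLoop2_stop _ _ _ _ _ _ (by decide)]
    simp
  · have hL : 1 ≤ L := by omega
    rw [if_neg hL0]
    have hdc : ∀ t : List Char, csOf t = csOf s.toList →
        PySem.Set.len (PySem.Set.ofList t) = PySem.Set.len (PySem.Set.ofList s.toList) :=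
      fun t h => csOf_len_eq h
    have hp1 : 1 ≤ 10 ^ (L - 1) := Nat.one_le_pow _ _ (by norm_num)
    have hp2 : 1 ≤ 10 ^ L := Nat.one_le_pow _ _ (by norm_num)
    have hpow : 10 ^ (L - 1) ≤ 10 ^ L := Nat.pow_le_pow_right (by norm_num) (by omega)
    have hsq1 := Nat.sqrt_le_self (10 ^ (L - 1) - 1)
    have hsq2 := Nat.sqrt_le_self (10 ^ L - 1)
    rw [show (1 : Int) = ((1 : Nat) : Int) from by norm_num]
    rw [loop1_eq L (10 ^ L + 2) 1 le_rfl (by unfold loA; omega) (by unfold loA; omega)]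
    rw [loop2_eq L hL _ _ hdc (10 ^ L + 2) (loA L) le_rfl (loA_le_hiA_succ L)
      (by unfold hiA loA; omega) []]
    rw [List.nil_append]
    rw [show Nat.sqrt (10 ^ L - 1) = hiA L from rfl]
    set M := (List.range' (loA L) (hiA L + 1 - loA L)).filter (pB (csOf s.toList)) with hM
    by_cases hM0 : M = []
    · rw [hM0]
      simp only [List.map_nil]
      rcases Nat.lt_or_ge L 2 with hL1 | hL2
      · exfalso
        have hL1' : L = 1 := by omega
        obtain ⟨c, hc⟩ := List.length_eq_one_iff.mp (hLdef ▸ hL1' : s.toList.length = 1)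
        have hcounts : csOf s.toList = [1] := by rw [hc]; exact csOf_single c
        have h3 : (3 : Nat) ∈ M := by
          rw [hM]
          refine List.mem_filter.mpr ⟨?_, pB_three _ hcounts⟩
          rw [List.mem_range'_1]
          rw [hL1']
          unfold loA hiA
          norm_num [sqrt_nine]
        rw [hM0] at h3
        exact absurd h3 (List.not_mem_nil)
      · rw [bLoop_none L hL2 (csOf s.toList) (hiA L + 2) (hiA L) (loA_le_hiA_succ L) le_rfl
          (hM ▸ hM0) (by omega)]
        norm_num
    · obtain ⟨j, hj⟩ : ∃ j, M.getLast? = some j := by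
        cases hgl : M.getLast? with
        | some j => exact ⟨j, rfl⟩
        | none => exact absurd (List.getLast?_eq_none_iff.mp hgl) hM0
      have hlohi : loA L ≤ hiA L := by
        by_contra hcon
        apply hM0
        rw [hM, show hiA L + 1 - loA L = 0 from by omega]
        simp
      rw [bLoop_some L hL (csOf s.toList) (hiA L + 2) (hiA L) hlohi le_rfl j (hM ▸ hj)
        (by omega)]
      rw [if_neg (by simp [hM0])]
      apply max_getD_eq_getLast?
      · refine List.pairwise_map.mpr ?_
        have h1 : M.Pairwise (· < ·) := List.Pairwise.filter _ (List.pairwise_lt_range' 1)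
        refine h1.imp ?_
        intro a b hab
        exact_mod_cast Nat.mul_lt_mul'' hab hab
      · rw [List.getLast?_map, hj]
        rfl
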